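-- pv_equiv track=rewrite | github.com/Senopiece/bottleneck_transmission | src/impls/_systematic.py | _select_layout
-- ===== SOURCE A (Python) =====
-- def _ceil_log2(x: int) -> int:
--     if x <= 1:
--         return 0
--     return x.bit_length() - (1 if (x & (x - 1)) == 0 else 0)
--
-- def _select_layout(message_bitsize: int, packet_bitsize: int):
--     """
--     Selects a optimal layout given message_bitsize and packet_bitsize.
--
--     Choose (rank, input_bits, output_bits, zero_pad) with:
--       - output_bits = packet_bitsize - input_bits > 0
--       - rank * output_bits >= message_bitsize
--     Optimize lexicographically:
--       1) rank (min)
--       2) zero_pad (min)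
--       3) input_bits (min)
--
--     Note: we would need to collect rank linearly inpependent observations to recover the original data. So we need it to be as small as possible.
--     Also lowering the rank increases output_bits that increases partitioning so the reconstruction becomes more parellelizable.
--     TODO: maybe sometimes it can be beneficial of having not the minimum possible rank, but achieving better results somehow (e.g. for 10,5 to use (5, 3, 2, 0) instead of (4, 2, 3, 0) - so theoretically its having lower rank, but the second option has better resilience from errors).
--     TODO: maybe apply ml in search of optimal layouting
--     """
--
--     p = message_bitsize
--     n = packet_bitsize
--
--     best = None  # (rank, zero_pad, input_bits, output_bits)
--
--     # A safe upper bound: if input_bits=0 allowed, rank=p is enough (when n>0).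
--     # We also cap rank by 2^n *something; but p is typically the meaningful bound.
--     for rank in range(1, max(2, p + 1)):
--         min_in = _ceil_log2(rank)
--
--         # input_bits can range up to n-1 (must leave at least 1 output bit)
--         for input_bits in range(min_in, n):
--             output_bits = n - input_bits
--             capacity = rank * output_bits
--             if capacity < p:
--                 continue
--
--             zero_pad = capacity - p
--             cand = (rank, zero_pad, input_bits, output_bits)
--
--             if best is None or cand[:3] < best[:3]:
--                 best = cand
--
--         # rank is primary objective; once we've found any solution at this rank,
--         # we can stop (because larger ranks are worse).
--         if best is not None and best[0] == rank:
--             break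
--
--     if best is None:
--         return None
--
--     rank, zero_pad, input_bits, output_bits = best
--     return rank, input_bits, output_bits, zero_pad
-- ===== SOURCE B (Python) =====
-- def _ceil_log2(x: int) -> int:
--     if x <= 1:
--         return 0
--     return x.bit_length() - (1 if (x & (x - 1)) == 0 else 0)
--
-- def _select_layout(message_bitsize: int, packet_bitsize: int):
--     # One arithmetic check per rank: the best candidate at a given rank is the
--     # one with the smallest feasible output_bits, namely max(ceil(p/rank), 1),
--     # so the whole inner scan over input_bits collapses to a ceiling division.
--     p = message_bitsize
--     n = packet_bitsize
--     for rank in range(1, max(1, p) + 1):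
--         output_bits = max(-(-p // rank), 1)
--         input_bits = n - output_bits
--         if input_bits >= _ceil_log2(rank):
--             return rank, input_bits, output_bits, rank * output_bits - p
--     return None
-- ===== Notes on version B (the rewrite author's own statement) =====
-- stated objective: simpler
-- what changed: The inner scan over all input_bits per rank and the lexicographic best-candidate bookkeeping are replaced by one ceiling division: the best candidate at a rank is always the one with minimal feasible output_bits = max(ceil(p/rank), 1), so B is a single loop over rank with O(1) work per rank.
import Mathlib
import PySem

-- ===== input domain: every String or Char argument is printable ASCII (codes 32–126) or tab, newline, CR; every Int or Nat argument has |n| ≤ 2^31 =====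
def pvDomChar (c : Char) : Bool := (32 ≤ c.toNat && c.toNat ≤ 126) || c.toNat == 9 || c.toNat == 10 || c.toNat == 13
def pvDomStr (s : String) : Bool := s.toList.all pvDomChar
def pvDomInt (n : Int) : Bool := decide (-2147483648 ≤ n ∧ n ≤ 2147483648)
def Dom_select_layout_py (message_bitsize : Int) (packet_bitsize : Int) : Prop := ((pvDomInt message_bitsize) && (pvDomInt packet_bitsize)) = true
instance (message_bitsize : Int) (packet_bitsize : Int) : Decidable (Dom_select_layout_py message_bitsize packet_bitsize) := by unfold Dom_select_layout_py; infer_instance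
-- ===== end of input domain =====

-- B replaces A's inner scan over input_bits by one ceiling division per rank (objective: simpler; the inner loop and the lexicographic best-candidate bookkeeping disappear).

-- ===== PORT A =====
-- port of _ceil_log2 (shared helper of both Python files)
def ceil_log2 (x : Int) : Int :=
  if x ≤ 1 then 0
  else (PySem.Int.bitLength x : Int) - (if PySem.Int.band x (x - 1) == 0 then 1 else 0)

-- Python tuple comparison cand[:3] < best[:3] (lexicographic on three ints)
def pyLt3 (a1 a2 a3 b1 b2 b3 : Int) : Bool :=
  decide (a1 < b1) || (a1 == b1 && (decide (a2 < b2) || (a2 == b2 && decide (a3 < b3))))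

-- body of A's inner loop over input_bits (best is threaded through a foldl)
def aInnerStep (p n rank : Int) (best : Option (Int × Int × Int × Int)) (input_bits : Int) :
    Option (Int × Int × Int × Int) :=
  let output_bits := n - input_bits
  let capacity := rank * output_bits
  if capacity < p then best
  else
    let zero_pad := capacity - p
    match best with
    | none => some (rank, zero_pad, input_bits, output_bits)
    | some b =>
        if pyLt3 rank zero_pad input_bits b.1 b.2.1 b.2.2.1
        then some (rank, zero_pad, input_bits, output_bits) else best

-- A's outer loop over rank, with the early break once best[0] == rank
def aOuter (p n : Int) (best : Option (Int × Int × Int × Int)) :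
    List Int → Option (Int × Int × Int × Int)
  | [] => best
  | rank :: rest =>
    let min_in := ceil_log2 rank
    let best' := (PySem.List.pyRange min_in n 1).foldl (aInnerStep p n rank) best
    if (match best' with | some b => b.1 == rank | none => false)
    then best'
    else aOuter p n best' rest

def select_layout_py (message_bitsize : Int) (packet_bitsize : Int) : Option (List Int) :=
  match aOuter message_bitsize packet_bitsize none
      (PySem.List.pyRange 1 (max 2 (message_bitsize + 1)) 1) with
  | none => none
  | some (rank, zero_pad, input_bits, output_bits) => some [rank, input_bits, output_bits, zero_pad]

-- ===== PORT B =====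
-- B's single loop: per rank, output_bits is computed by a ceiling division, no inner loop
def bLoop (p n : Int) : List Int → Option (List Int)
  | [] => none
  | rank :: rest =>
      let output_bits := max (-(PySem.Int.floordiv (-p) rank)) 1
      let input_bits := n - output_bits
      if ceil_log2 rank ≤ input_bits
      then some [rank, input_bits, output_bits, rank * output_bits - p]
      else bLoop p n rest

def select_layout_py_alt (message_bitsize : Int) (packet_bitsize : Int) : Option (List Int) :=
  bLoop message_bitsize packet_bitsize
    (PySem.List.pyRange 1 (max 1 message_bitsize + 1) 1)

-- ===== PRECONDITION & SPEC =====
def Spec_select_layout_py (message_bitsize : Int) (packet_bitsize : Int) (out : Option (List Int)) : Prop := out = select_layout_py_alt message_bitsize packet_bitsize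
instance (message_bitsize : Int) (packet_bitsize : Int) (out : Option (List Int)) : Decidable (Spec_select_layout_py message_bitsize packet_bitsize out) := by unfold Spec_select_layout_py; infer_instance

-- ===== CLAIM (what is proved, stated in full; the proofs are below) =====
def Claim_equal_select_layout_py : Prop := ∀ (message_bitsize : Int) (packet_bitsize : Int), Dom_select_layout_py message_bitsize packet_bitsize → Spec_select_layout_py message_bitsize packet_bitsize (select_layout_py message_bitsize packet_bitsize)

-- ===== LEMMAS AND PROOFS =====

-- the optimal output_bits at a given rank: max(ceil(p/rank), 1)
def obOf (p rank : Int) : Int := max (-(PySem.Int.floordiv (-p) rank)) 1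

-- feasibility of input_bits a at rank r, rephrased through obOf
lemma feas_iff (p n r a : Int) (hr : 1 ≤ r) (ha : a < n) :
    r * (n - a) < p ↔ n - obOf p r < a := by
  have hc := (PySem.Int.neg_floordiv_neg_eq_iff_of_pos (a := p) (b := r)
      (q := -(PySem.Int.floordiv (-p) r)) (by omega)).mp rfl
  obtain ⟨h1, h2⟩ := hc
  unfold obOf
  rcases max_cases (-(PySem.Int.floordiv (-p) r)) 1 with ⟨hm, hm'⟩ | ⟨hm, hm'⟩ <;>
    rw [hm] <;> constructor <;> intro h <;> nlinarith

-- invariant carried by A's inner fold: best is none or an earlier feasible candidate at this rank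
def InnerInv (p n r a : Int) (best : Option (Int × Int × Int × Int)) : Prop :=
  best = none ∨ ∃ ib0, ib0 < a ∧ ib0 ≤ n - obOf p r ∧
    best = some (r, r * (n - ib0) - p, ib0, n - ib0)

-- A's inner fold computes the single best candidate at rank r in closed form
lemma inner_eq (p n r : Int) (hr : 1 ≤ r) :
    ∀ (k : Nat) (a : Int), (n - a).toNat = k →
    ∀ best, InnerInv p n r a best →
    (PySem.List.pyRange a n 1).foldl (aInnerStep p n r) best =
      if a ≤ n - obOf p r
      then some (r, r * (obOf p r) - p, n - obOf p r, obOf p r)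
      else best := by
  intro k
  induction k with
  | zero =>
      intro a hk best hinv
      have han : n ≤ a := by omega
      have hob : 1 ≤ obOf p r := le_max_right _ _
      rw [PySem.List.pyRange_one_eq_nil han, List.foldl_nil, if_neg (by omega)]
  | succ m ih =>
      intro a hk best hinv
      have han : a < n := by omega
      rw [PySem.List.pyRange_one_cons han, List.foldl_cons]
      by_cases hcap : r * (n - a) < p
      · -- infeasible input_bits: skipped; by feas_iff everything later is infeasible too
        have hgt : n - obOf p r < a := (feas_iff p n r a hr han).mp hcap
        have hstep : aInnerStep p n r best a = best := by
          unfold aInnerStep; simp [hcap]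
        rw [hstep, ih (a + 1) (by omega) best ?_]
        · rw [if_neg (by omega), if_neg (by omega)]
        · rcases hinv with h | ⟨ib0, h1, h2, h3⟩
          · exact Or.inl h
          · exact Or.inr ⟨ib0, by omega, h2, h3⟩
      · -- feasible: candidate at a replaces best (same rank, strictly smaller zero_pad)
        have hle : a ≤ n - obOf p r := by
          have := (feas_iff p n r a hr han).not.mp hcap; omega
        have hstep : aInnerStep p n r best a
            = some (r, r * (n - a) - p, a, n - a) := by
          unfold aInnerStep
          rcases hinv with h | ⟨ib0, h1, h2, h3⟩
          · simp [h, hcap]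
          · have hzp : r * (n - a) - p < r * (n - ib0) - p := by nlinarith
            have hlt : pyLt3 r (r * (n - a) - p) a r (r * (n - ib0) - p) ib0 = true := by
              unfold pyLt3; simp [hzp]
            simp [h3, hcap, hlt]
        rw [hstep, ih (a + 1) (by omega) _ (Or.inr ⟨a, by omega, hle, rfl⟩)]
        by_cases hnext : a + 1 ≤ n - obOf p r
        · rw [if_pos hnext, if_pos hle]
        · have haeq : a = n - obOf p r := by omega
          rw [if_neg hnext, if_pos hle]
          have : n - (n - obOf p r) = obOf p r := by omega
          rw [haeq, this]

-- both outer loops agree on any list of positive ranks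
lemma outer_eq (p n : Int) :
    ∀ ranks : List Int, (∀ r ∈ ranks, 1 ≤ r) →
    (match aOuter p n none ranks with
     | none => none
     | some (rank, zero_pad, input_bits, output_bits) =>
        some [rank, input_bits, output_bits, zero_pad]) = bLoop p n ranks := by
  intro ranks
  induction ranks with
  | nil => intro _; simp [aOuter, bLoop]
  | cons r rest ih =>
      intro hmem
      have hr : 1 ≤ r := hmem r (List.mem_cons_self ..)
      have hinner := inner_eq p n r hr (n - ceil_log2 r).toNat (ceil_log2 r) rfl
        none (Or.inl rfl)
      show (match aOuter p n none (r :: rest) with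
            | none => none
            | some (rank, zero_pad, input_bits, output_bits) =>
                some [rank, input_bits, output_bits, zero_pad]) = bLoop p n (r :: rest)
      rw [aOuter, bLoop]
      by_cases hf : ceil_log2 r ≤ n - obOf p r
      · rw [hinner]
        simp only [if_pos hf]
        simp only [obOf] at hf
        simp [obOf, hf]
      · rw [hinner]
        simp only [if_neg hf]
        simp only [obOf] at hf
        simp only [if_neg hf]
        simp
        exact ih (fun x hx => hmem x (List.mem_cons_of_mem _ hx))

-- ===== VERDICT (by name: the statement is the Claim_ definition above) =====
theorem select_layout_py_spec : Claim_equal_select_layout_py := by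
  unfold Claim_equal_select_layout_py
  intro p n _
  unfold Spec_select_layout_py select_layout_py select_layout_py_alt
  have hb : max 1 p + 1 = max 2 (p + 1) := by omega
  rw [hb]
  exact outer_eq p n (PySem.List.pyRange 1 (max 2 (p + 1)) 1)
    (fun r hrm => ((PySem.List.mem_pyRange_one).mp hrm).1)
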